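-- pv_equiv track=rewrite | github.com/TerrifyingAnt/Shedulae-AI-RL | decision_policy.py | get_subject_count_in_a_week
-- ===== SOURCE A (Python) =====
-- def get_subject_count_in_a_week(subject, schedule):
--     # Проверка на соответствие количества предметов заданному количеству
--     subject_counts = {}
--     for day, periods in schedule.items():
--         for period, subject_teacher in periods.items():
--             if subject_teacher is not None:
--                 temp_subject, teacher = subject_teacher
--                 subject_counts[temp_subject] = subject_counts.get(temp_subject, 0) + 1
--
--     for temp_subject, count in subject_counts.items():
--         if subject == temp_subject:
--             return count
--     return 0
-- ===== SOURCE B (Python) =====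
-- def get_subject_count_in_a_week(subject, schedule):
--     count = 0
--     for day, periods in schedule.items():
--         for period, subject_teacher in periods.items():
--             if subject_teacher is not None:
--                 temp_subject, teacher = subject_teacher
--                 if temp_subject == subject:
--                     count += 1
--     return count
-- ===== Notes on version B (the rewrite author's own statement) =====
-- stated objective: simpler
-- what changed: B keeps a single integer counter incremented on matching entries in one nested pass, instead of building a full per-subject count dict and then scanning its items for the subject.
import Mathlib
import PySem

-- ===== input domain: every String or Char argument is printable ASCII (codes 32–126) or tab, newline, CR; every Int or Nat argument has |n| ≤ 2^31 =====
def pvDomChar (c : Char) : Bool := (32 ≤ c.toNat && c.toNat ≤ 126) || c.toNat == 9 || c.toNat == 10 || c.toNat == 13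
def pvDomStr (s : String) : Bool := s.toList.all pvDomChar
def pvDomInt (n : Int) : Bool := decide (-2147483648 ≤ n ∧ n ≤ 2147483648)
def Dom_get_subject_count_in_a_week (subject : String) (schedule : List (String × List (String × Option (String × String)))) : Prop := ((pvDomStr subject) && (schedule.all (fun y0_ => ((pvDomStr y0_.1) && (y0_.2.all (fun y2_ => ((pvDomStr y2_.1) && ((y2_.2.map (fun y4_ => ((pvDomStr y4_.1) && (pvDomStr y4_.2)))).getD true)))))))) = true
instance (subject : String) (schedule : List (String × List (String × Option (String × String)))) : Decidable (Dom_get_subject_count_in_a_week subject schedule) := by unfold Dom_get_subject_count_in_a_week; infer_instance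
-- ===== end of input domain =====

-- B replaces A's per-subject count dictionary and second scan with a single integer
-- counter incremented during the same nested pass (objective: simpler).

-- ===== PORT A =====
-- A's second loop: scan the dict's items, returning the count of the first key equal to subject, else 0.
def pvScanA (subject : String) : List (String × Int) → Int
  | [] => 0
  | (k, c) :: rest => if subject == k then c else pvScanA subject rest

def get_subject_count_in_a_week (subject : String) (schedule : List (String × List (String × Option (String × String)))) : Int :=
  let subject_counts : PySem.Dict String Int :=
    schedule.foldl (fun sc day =>
      day.2.foldl (fun sc p =>
        match p.2 with
        | none => sc
        | some subject_teacher => sc.insert subject_teacher.1 (sc.getD subject_teacher.1 0 + 1)) sc)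
      PySem.Dict.empty
  pvScanA subject subject_counts.items

-- ===== PORT B =====
def get_subject_count_in_a_week_alt (subject : String) (schedule : List (String × List (String × Option (String × String)))) : Int :=
  schedule.foldl (fun count day =>
    day.2.foldl (fun count p =>
      match p.2 with
      | none => count
      | some subject_teacher => if subject_teacher.1 == subject then count + 1 else count) count) 0

-- ===== PRECONDITION & SPEC =====
def Spec_get_subject_count_in_a_week (subject : String) (schedule : List (String × List (String × Option (String × String)))) (out : Int) : Prop := out = get_subject_count_in_a_week_alt subject schedule
instance (subject : String) (schedule : List (String × List (String × Option (String × String)))) (out : Int) : Decidable (Spec_get_subject_count_in_a_week subject schedule out) := by unfold Spec_get_subject_count_in_a_week; infer_instance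

-- ===== CLAIM (what is proved, stated in full; the proofs are below) =====
def Claim_equal_get_subject_count_in_a_week : Prop := ∀ (subject : String) (schedule : List (String × List (String × Option (String × String)))), Dom_get_subject_count_in_a_week subject schedule → Spec_get_subject_count_in_a_week subject schedule (get_subject_count_in_a_week subject schedule)

-- ===== LEMMAS AND PROOFS =====

-- the flattened list of subjects of all non-None entries, in traversal order
def pvFlat (schedule : List (String × List (String × Option (String × String)))) : List String :=
  schedule.flatMap (fun day => day.2.filterMap (fun p => p.2.map (·.1)))

theorem pvA_inner (periods : List (String × Option (String × String))) (d : PySem.Dict String Int) :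
    periods.foldl (fun sc p =>
        match p.2 with
        | none => sc
        | some st => sc.insert st.1 (sc.getD st.1 0 + 1)) d
      = (periods.filterMap (fun p => p.2.map (·.1))).foldl
          (fun sc x => sc.insert x (sc.getD x 0 + 1)) d := by
  induction periods generalizing d with
  | nil => rfl
  | cons p rest ih =>
    cases p with | mk k st =>
    cases st <;> simp only [List.foldl_cons, List.filterMap_cons, Option.map_none, Option.map_some] <;> exact ih _

theorem pvA_dict (schedule : List (String × List (String × Option (String × String)))) (d : PySem.Dict String Int) :
    schedule.foldl (fun sc day =>
      day.2.foldl (fun sc p =>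
        match p.2 with
        | none => sc
        | some st => sc.insert st.1 (sc.getD st.1 0 + 1)) sc) d
      = (pvFlat schedule).foldl (fun sc x => sc.insert x (sc.getD x 0 + 1)) d := by
  induction schedule generalizing d with
  | nil => rfl
  | cons day rest ih =>
    rw [List.foldl_cons, ih, pvA_inner]
    simp [pvFlat, List.foldl_append]

theorem pvScanA_map (subject : String) (ks : List String) (f : String → Int) :
    pvScanA subject (ks.map (fun k => (k, f k))) = if subject ∈ ks then f subject else 0 := by
  induction ks with
  | nil => simp [pvScanA]
  | cons k rest ih =>
    simp only [List.map_cons, pvScanA, List.mem_cons, ih]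
    by_cases h : subject = k
    · simp [h]
    · simp [h]

theorem pvB_inner (subject : String) (periods : List (String × Option (String × String))) (acc : Int) :
    periods.foldl (fun count p =>
      match p.2 with
      | none => count
      | some st => if st.1 == subject then count + 1 else count) acc
      = acc + ((periods.filterMap (fun p => p.2.map (·.1))).count subject : Int) := by
  induction periods generalizing acc with
  | nil => simp
  | cons p rest ih =>
    cases p with | mk k st =>
    cases st with
    | none =>
      simp only [List.foldl_cons, List.filterMap_cons, Option.map_none]
      exact ih _
    | some v =>
      simp only [List.foldl_cons, List.filterMap_cons, Option.map_some, List.count_cons]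
      rw [ih]
      by_cases h : v.1 = subject
      · rw [if_pos (by simp [h])]; simp [h]; ring
      · rw [if_neg (by simp [h])]; simp [h]

theorem pvB_eq (subject : String) (schedule : List (String × List (String × Option (String × String)))) (acc : Int) :
    schedule.foldl (fun count day =>
      day.2.foldl (fun count p =>
        match p.2 with
        | none => count
        | some st => if st.1 == subject then count + 1 else count) count) acc
      = acc + ((pvFlat schedule).count subject : Int) := by
  induction schedule generalizing acc with
  | nil => simp [pvFlat]
  | cons day rest ih =>
    rw [List.foldl_cons, ih, pvB_inner]
    simp [pvFlat, List.count_append]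
    ring

-- ===== VERDICT (by name: the statement is the Claim_ definition above) =====
theorem get_subject_count_in_a_week_spec : Claim_equal_get_subject_count_in_a_week := by
  intro subject schedule _
  unfold Spec_get_subject_count_in_a_week get_subject_count_in_a_week get_subject_count_in_a_week_alt
  simp only [pvA_dict, pvB_eq, PySem.Dict.foldl_insert_getD_add_one_eq_counter,
    PySem.Dict.items_counter, pvScanA_map]
  by_cases h : subject ∈ pvFlat schedule
  · simp [h, PySem.Set.mem_ofList]
  · simp [h, PySem.Set.mem_ofList, List.count_eq_zero_of_not_mem h]
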